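-- pv_equiv track=rewrite | github.com/KingEverett/Hermes | backend/templates/__init__.py | _validate_tables
-- ===== SOURCE A (Python) =====
-- def _validate_tables(content: str) -> bool:
--     """Validate markdown table structure."""
--     lines = content.split('\n')
--     in_table = False
--     column_count = 0
--
--     for line in lines:
--         if '|' in line:
--             if not in_table:
--                 # Start of table
--                 column_count = line.count('|') - 1
--                 in_table = True
--             else:
--                 # Check column count consistency
--                 current_count = line.count('|') - 1
--                 if current_count != column_count and '---' not in line:
--                     return False
--         elif in_table and line.strip() and '---' not in line:
--             # Table ended
--             in_table = False
--             column_count = 0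
--
--     return True
-- ===== SOURCE B (Python) =====
-- def _block_ok(block):
--     ref = block[0].count('|') - 1
--     return all(line.count('|') - 1 == ref
--                for line in block[1:] if '---' not in line)
--
--
-- def _validate_tables(content: str) -> bool:
--     """Validate markdown table structure (two-pass: segment into blocks, then check each)."""
--     blocks = []
--     current = None
--     for line in content.split('\n'):
--         if '|' in line:
--             current = (current or []) + [line]
--         elif current is not None and line.strip() and '---' not in line:
--             blocks.append(current)
--             current = None
--     if current is not None:
--         blocks.append(current)
--     return all(_block_ok(b) for b in blocks)
-- ===== Notes on version B (the rewrite author's own statement) =====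
-- stated objective: alternative
-- what changed: Replaces the single stateful scan with early return by a two-pass design: first segment the lines into table blocks, then validate each block against its first line's pipe count.
import Mathlib
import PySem

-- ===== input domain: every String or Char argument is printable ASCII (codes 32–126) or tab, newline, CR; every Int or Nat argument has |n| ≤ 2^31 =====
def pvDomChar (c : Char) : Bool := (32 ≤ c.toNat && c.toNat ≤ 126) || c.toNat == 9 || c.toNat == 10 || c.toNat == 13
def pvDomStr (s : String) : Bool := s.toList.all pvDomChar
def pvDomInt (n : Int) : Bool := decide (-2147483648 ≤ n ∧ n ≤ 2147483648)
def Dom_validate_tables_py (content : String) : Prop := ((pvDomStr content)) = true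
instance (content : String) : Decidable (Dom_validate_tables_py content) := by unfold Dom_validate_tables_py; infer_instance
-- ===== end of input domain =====

-- B is an alternative decomposition of A's single stateful scan: segment lines into table
-- blocks first, then validate each block; same asymptotic cost, return value proved equal.

-- ===== PORT A =====
-- A's loop state: in_table flag and column_count; returns early False on a mismatch.
def loopA : List String → Bool → Int → Bool
  | [], _, _ => true
  | l :: ls, inTable, cc =>
    if PySem.Str.isIn "|" l then
      if !inTable then
        loopA ls true ((PySem.Str.count l "|" : Int) - 1)
      else
        if (((PySem.Str.count l "|" : Int) - 1) != cc) && !(PySem.Str.isIn "---" l) then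
          false
        else
          loopA ls inTable cc
    else
      if inTable && (PySem.Str.strip l != "") && !(PySem.Str.isIn "---" l) then
        loopA ls false 0
      else
        loopA ls inTable cc

def validate_tables_py (content : String) : Bool :=
  loopA ((PySem.Str.split? content "\n").getD []) false 0

-- ===== PORT B =====
-- Source B's _block_ok: first line's pipe count is the reference; later lines without '---' must match.
def blockOk (b : List String) : Bool :=
  match b with
  | [] => true
  | first :: rest =>
    rest.all fun l =>
      PySem.Str.isIn "---" l ||
        (((PySem.Str.count l "|" : Int) - 1) == ((PySem.Str.count first "|" : Int) - 1))

-- Source B's first pass: group lines into table blocks ('current' is the open block, if any).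
def segB : List String → Option (List String) → List (List String)
  | [], none => []
  | [], some cur => [cur]
  | l :: ls, cur =>
    if PySem.Str.isIn "|" l then
      segB ls (some (cur.getD [] ++ [l]))
    else
      if cur.isSome && (PySem.Str.strip l != "") && !(PySem.Str.isIn "---" l) then
        cur.getD [] :: segB ls none
      else
        segB ls cur

def validate_tables_py_alt (content : String) : Bool :=
  (segB ((PySem.Str.split? content "\n").getD []) none).all blockOk

-- ===== PRECONDITION & SPEC =====
def Spec_validate_tables_py (content : String) (out : Bool) : Prop := out = validate_tables_py_alt content
instance (content : String) (out : Bool) : Decidable (Spec_validate_tables_py content out) := by unfold Spec_validate_tables_py; infer_instance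

-- ===== CLAIM (what is proved, stated in full; the proofs are below) =====
def Claim_equal_validate_tables_py : Prop := ∀ (content : String), Dom_validate_tables_py content → Spec_validate_tables_py content (validate_tables_py content)

-- ===== LEMMAS AND PROOFS =====

-- blockOk of an extended open block splits into the old block and the new line's check
lemma blockOk_cons_append (first l : String) (rest : List String) :
    blockOk (first :: (rest ++ [l]))
      = (blockOk (first :: rest)
         && (PySem.Str.isIn "---" l
             || (((PySem.Str.count l "|" : Int) - 1) == ((PySem.Str.count first "|" : Int) - 1)))) := by
  simp only [blockOk, List.all_append, List.all_cons, List.all_nil, Bool.and_true]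

-- once the open block is already invalid, the whole second pass is False
lemma segB_fail (ls : List String) : ∀ first rest, blockOk (first :: rest) = false →
    ((segB ls (some (first :: rest))).all blockOk) = false := by
  induction ls with
  | nil =>
    intro first rest h
    simp only [segB, List.all_cons, List.all_nil, Bool.and_true, h]
  | cons l ls ih =>
    intro first rest h
    rw [segB]
    by_cases hp : PySem.Str.isIn "|" l = true
    · rw [if_pos hp]
      have hgd : ((some (first :: rest)).getD [] ++ [l]) = first :: (rest ++ [l]) := rfl
      rw [hgd]
      apply ih
      rw [blockOk_cons_append, h, Bool.false_and]
    · rw [if_neg hp]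
      by_cases he : ((some (first :: rest)).isSome && (PySem.Str.strip l != "")
            && !(PySem.Str.isIn "---" l)) = true
      · rw [if_pos he]
        simp only [List.all_cons, Option.getD_some, h, Bool.false_and]
      · rw [if_neg he]
        exact ih first rest h

-- main invariant: A's scan state (in_table, column_count) corresponds to B's open block
lemma key (ls : List String) :
    (∀ first rest, blockOk (first :: rest) = true →
      loopA ls true ((PySem.Str.count first "|" : Int) - 1)
        = (segB ls (some (first :: rest))).all blockOk)
    ∧ loopA ls false 0 = (segB ls none).all blockOk := by
  induction ls with
  | nil =>
    constructor
    · intro first rest h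
      simp only [loopA, segB, List.all_cons, List.all_nil, Bool.and_true, h]
    · simp only [loopA, segB, List.all_nil]
  | cons l ls ih =>
    constructor
    · intro first rest h
      rw [loopA, segB]
      by_cases hp : PySem.Str.isIn "|" l = true
      · rw [if_pos hp, if_pos hp]
        have hgd : ((some (first :: rest)).getD [] ++ [l]) = first :: (rest ++ [l]) := rfl
        rw [hgd]
        simp only [Bool.not_true, Bool.false_eq_true, if_false]
        by_cases hq : ((((PySem.Str.count l "|" : Int) - 1) != ((PySem.Str.count first "|" : Int) - 1))
              && !(PySem.Str.isIn "---" l)) = true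
        · rw [if_pos hq]
          have hq' := (Bool.and_eq_true _ _).mp hq
          have hxy : (((PySem.Str.count l "|" : Int) - 1) == ((PySem.Str.count first "|" : Int) - 1)) = false :=
            (Bool.not_eq_true' _).mp hq'.1
          have ha : PySem.Str.isIn "---" l = false := (Bool.not_eq_true' _).mp hq'.2
          have hblk : blockOk (first :: (rest ++ [l])) = false := by
            rw [blockOk_cons_append, hxy, ha, Bool.or_false, Bool.and_false]
          exact (segB_fail ls first (rest ++ [l]) hblk).symm
        · rw [if_neg hq]
          have hq' := Bool.and_eq_false_iff.mp (Bool.eq_false_iff.mpr hq)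
          have hblk : blockOk (first :: (rest ++ [l])) = true := by
            rw [blockOk_cons_append, h, Bool.true_and]
            rcases hq' with h1 | h1
            · rw [(Bool.not_eq_false' _).mp h1, Bool.or_true]
            · rw [(Bool.not_eq_false' _).mp h1, Bool.true_or]
          exact ih.1 first (rest ++ [l]) hblk
      · rw [if_neg hp, if_neg hp]
        by_cases he : ((PySem.Str.strip l != "") && !(PySem.Str.isIn "---" l)) = true
        · rw [if_pos (by simp only [Bool.true_and]; exact he),
              if_pos (by simp only [Option.isSome_some, Bool.true_and]; exact he)]
          simp only [List.all_cons, Option.getD_some, h, Bool.true_and]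
          exact ih.2
        · rw [if_neg (by simp only [Bool.true_and]; exact he),
              if_neg (by simp only [Option.isSome_some, Bool.true_and]; exact he)]
          exact ih.1 first rest h
    · rw [loopA, segB]
      by_cases hp : PySem.Str.isIn "|" l = true
      · rw [if_pos hp, if_pos hp]
        simp only [Bool.not_false, if_true, Option.getD_none, List.nil_append]
        exact ih.1 l [] (by simp only [blockOk, List.all_nil])
      · rw [if_neg hp, if_neg hp,
            if_neg (by simp), if_neg (by simp)]
        exact ih.2

-- ===== VERDICT (by name: the statement is the Claim_ definition above) =====
theorem validate_tables_py_spec : Claim_equal_validate_tables_py := by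
  intro content _
  unfold Spec_validate_tables_py validate_tables_py validate_tables_py_alt
  exact (key ((PySem.Str.split? content "\n").getD [])).2
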